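-- pv_equiv track=rewrite | github.com/Viktorija0719/sarek-variant-calling | scripts/merge_sv_vcfs.py | choose_best_csq
-- ===== SOURCE A (Python) =====
-- from typing import Dict, Iterable, List, Optional, Tuple
--
-- def impact_rank(impact: str) -> int:
--     order = {"HIGH": 4, "MODERATE": 3, "LOW": 2, "MODIFIER": 1}
--     return order.get((impact or "").upper(), 0)
--
-- def csq_get(entry: Optional[List[str]], csq_fields: List[str], name: str) -> str:
--     if not entry or not csq_fields:
--         return "."
--     try:
--         i = csq_fields.index(name)
--     except ValueError:
--         return "."
--     return entry[i] if i < len(entry) and entry[i] != "" else "."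
--
-- def choose_best_csq(csq_entries: List[List[str]], csq_fields: List[str]) -> Optional[List[str]]:
--     if not csq_entries or not csq_fields:
--         return None
--     best = None
--     best_key = None
--     for e in csq_entries:
--         key = (
--             1 if csq_get(e, csq_fields, "MANE_PLUS_CLINICAL") not in ("", ".") else 0,
--             1 if csq_get(e, csq_fields, "MANE_SELECT") not in ("", ".") else 0,
--             1 if csq_get(e, csq_fields, "MANE") not in ("", ".") else 0,
--             1 if csq_get(e, csq_fields, "CANONICAL") == "YES" else 0,
--             impact_rank(csq_get(e, csq_fields, "IMPACT")),
--         )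
--         if best is None or key > best_key:
--             best = e
--             best_key = key
--     return best
-- ===== SOURCE B (Python) =====
-- def impact_rank(impact):
--     order = {"HIGH": 4, "MODERATE": 3, "LOW": 2, "MODIFIER": 1}
--     return order.get((impact or "").upper(), 0)
--
-- def csq_get(entry, csq_fields, name):
--     if not entry or not csq_fields:
--         return "."
--     try:
--         i = csq_fields.index(name)
--     except ValueError:
--         return "."
--     return entry[i] if i < len(entry) and entry[i] != "" else "."
--
-- def choose_best_csq(csq_entries, csq_fields):
--     # Successive-refinement cascade: filter the candidate list by each priority
--     # criterion in turn (keep only entries attaining the criterion's maximum),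
--     # then return the first survivor.
--     if not csq_entries or not csq_fields:
--         return None
--     scores = [
--         lambda e: 0 if csq_get(e, csq_fields, "MANE_PLUS_CLINICAL") in ("", ".") else 1,
--         lambda e: 0 if csq_get(e, csq_fields, "MANE_SELECT") in ("", ".") else 1,
--         lambda e: 0 if csq_get(e, csq_fields, "MANE") in ("", ".") else 1,
--         lambda e: 1 if csq_get(e, csq_fields, "CANONICAL") == "YES" else 0,
--         lambda e: impact_rank(csq_get(e, csq_fields, "IMPACT")),
--     ]
--     cands = csq_entries
--     for score in scores:
--         m = max(score(e) for e in cands)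
--         cands = [e for e in cands if score(e) == m]
--     return cands[0]
-- ===== Notes on version B (the rewrite author's own statement) =====
-- stated objective: alternative
-- what changed: Replaces A's single-pass track-the-best loop over lexicographic key tuples by a successive-refinement cascade: the candidate list is filtered by each priority criterion in turn (keeping only entries attaining that criterion's maximum) and the first survivor is returned.
import Mathlib
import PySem

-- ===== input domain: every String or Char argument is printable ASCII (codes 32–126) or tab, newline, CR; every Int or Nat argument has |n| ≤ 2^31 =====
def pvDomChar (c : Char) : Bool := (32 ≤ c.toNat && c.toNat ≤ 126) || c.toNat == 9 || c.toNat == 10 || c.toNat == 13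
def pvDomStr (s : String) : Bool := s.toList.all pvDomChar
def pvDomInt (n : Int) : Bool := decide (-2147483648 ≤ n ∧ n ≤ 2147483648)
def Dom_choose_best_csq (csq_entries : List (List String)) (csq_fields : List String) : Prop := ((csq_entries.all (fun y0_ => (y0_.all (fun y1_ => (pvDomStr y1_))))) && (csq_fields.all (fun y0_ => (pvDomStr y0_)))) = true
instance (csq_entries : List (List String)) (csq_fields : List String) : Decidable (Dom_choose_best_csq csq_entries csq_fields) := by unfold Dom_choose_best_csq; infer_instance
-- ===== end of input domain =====

-- B replaces A's track-the-best loop over lexicographic key tuples by a successive-refinement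
-- cascade: filter the candidates by each priority criterion in turn, return the first survivor.


-- ===== PORT A =====
-- helper impact_rank (shared by both Pythons)
def impactRank (impact : String) : Int :=
  (PySem.Dict.ofList [("HIGH", (4:Int)), ("MODERATE", 3), ("LOW", 2), ("MODIFIER", 1)]).getD
    (PySem.Str.upper (if impact = "" then "" else impact)) 0

-- helper csq_get (shared by both Pythons)
def csqGet (entry : List String) (csq_fields : List String) (name : String) : String :=
  if entry = [] ∨ csq_fields = [] then "."
  else
    match PySem.List.index? csq_fields name with
    | none => "."
    | some i => if i < entry.length ∧ entry.getD i "" ≠ "" then entry.getD i "" else "."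

-- the 5-component priority key tuple A builds for each entry
def keyOf (csq_fields : List String) (e : List String) : Int × Int × Int × Int × Int :=
  ((if csqGet e csq_fields "MANE_PLUS_CLINICAL" ≠ "" ∧ csqGet e csq_fields "MANE_PLUS_CLINICAL" ≠ "." then 1 else 0),
   (if csqGet e csq_fields "MANE_SELECT" ≠ "" ∧ csqGet e csq_fields "MANE_SELECT" ≠ "." then 1 else 0),
   (if csqGet e csq_fields "MANE" ≠ "" ∧ csqGet e csq_fields "MANE" ≠ "." then 1 else 0),
   (if csqGet e csq_fields "CANONICAL" = "YES" then 1 else 0),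
   impactRank (csqGet e csq_fields "IMPACT"))

-- Python's lexicographic '<' on the 5-tuple (exact: componentwise Int comparison, left to right)
def keyLt (a b : Int × Int × Int × Int × Int) : Bool :=
  decide (a.1 < b.1 ∨ a.1 = b.1 ∧ (a.2.1 < b.2.1 ∨ a.2.1 = b.2.1 ∧
    (a.2.2.1 < b.2.2.1 ∨ a.2.2.1 = b.2.2.1 ∧
      (a.2.2.2.1 < b.2.2.2.1 ∨ a.2.2.2.1 = b.2.2.2.1 ∧ a.2.2.2.2 < b.2.2.2.2))))

def choose_best_csq (csq_entries : List (List String)) (csq_fields : List String) : Option (List String) :=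
  if csq_entries = [] ∨ csq_fields = [] then none
  else
    (csq_entries.foldl
      (fun (st : Option (List String) × Option (Int × Int × Int × Int × Int)) e =>
        let key := keyOf csq_fields e
        match st with
        | (none, _) => (some e, some key)
        | (some b, some bk) => if keyLt bk key then (some e, some key) else (some b, some bk)
        | (some _, none) => (some e, some key))  -- unreachable: best_key is set whenever best is
      (none, none)).1

-- ===== PORT B =====
-- Source B's five score lambdas, one helper each (closing over csq_fields)
def scoreMPC (csq_fields : List String) (e : List String) : Int :=
  if csqGet e csq_fields "MANE_PLUS_CLINICAL" = "" ∨ csqGet e csq_fields "MANE_PLUS_CLINICAL" = "." then 0 else 1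
def scoreMS (csq_fields : List String) (e : List String) : Int :=
  if csqGet e csq_fields "MANE_SELECT" = "" ∨ csqGet e csq_fields "MANE_SELECT" = "." then 0 else 1
def scoreM (csq_fields : List String) (e : List String) : Int :=
  if csqGet e csq_fields "MANE" = "" ∨ csqGet e csq_fields "MANE" = "." then 0 else 1
def scoreC (csq_fields : List String) (e : List String) : Int :=
  if csqGet e csq_fields "CANONICAL" = "YES" then 1 else 0
def scoreI (csq_fields : List String) (e : List String) : Int :=
  impactRank (csqGet e csq_fields "IMPACT")

-- one step of the cascade: m = max(score(e) for e in cands); cands = [e for e in cands if score(e) == m]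
def refine1 (g : List String → Int) (cands : List (List String)) : List (List String) :=
  match PySem.List.max? (cands.map g) (fun x => x) with
  | none => []  -- unreachable: cands is never empty (Python's max would raise only here)
  | some m => cands.filter (fun e => g e == m)

def choose_best_csq_alt (csq_entries : List (List String)) (csq_fields : List String) : Option (List String) :=
  if csq_entries = [] ∨ csq_fields = [] then none
  else
    let scores := [scoreMPC csq_fields, scoreMS csq_fields, scoreM csq_fields,
                   scoreC csq_fields, scoreI csq_fields]
    let cands := scores.foldl (fun cs g => refine1 g cs) csq_entries
    PySem.List.pyGet? cands (0 : Int)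

-- ===== PRECONDITION & SPEC =====
def Spec_choose_best_csq (csq_entries : List (List String)) (csq_fields : List String) (out : Option (List String)) : Prop := out = choose_best_csq_alt csq_entries csq_fields
instance (csq_entries : List (List String)) (csq_fields : List String) (out : Option (List String)) : Decidable (Spec_choose_best_csq csq_entries csq_fields out) := by unfold Spec_choose_best_csq; infer_instance

-- ===== CLAIM (what is proved, stated in full; the proofs are below) =====
def Claim_equal_choose_best_csq : Prop := ∀ (csq_entries : List (List String)) (csq_fields : List String), Dom_choose_best_csq csq_entries csq_fields → Spec_choose_best_csq csq_entries csq_fields (choose_best_csq csq_entries csq_fields)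

-- ===== LEMMAS AND PROOFS =====

-- first-argmax recursion A implements
def pick (f : List String → Int × Int × Int × Int × Int) (b : List String) : List (List String) → List String
  | [] => b
  | e :: l => if keyLt (f b) (f e) then pick f e l else pick f b l

theorem keyLt_irrefl (a : Int × Int × Int × Int × Int) : keyLt a a = false := by
  simp [keyLt]

theorem keyLt_total {a b : Int × Int × Int × Int × Int}
    (h1 : keyLt a b = false) (h2 : keyLt b a = false) : a = b := by
  obtain ⟨a1, a2, a3, a4, a5⟩ := a
  obtain ⟨b1, b2, b3, b4, b5⟩ := b
  simp only [keyLt, decide_eq_false_iff_not, not_or, not_and_or, not_lt] at h1 h2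
  simp only [Prod.mk.injEq]
  omega

theorem keyLt_trans {a b c : Int × Int × Int × Int × Int}
    (h1 : keyLt a b = true) (h2 : keyLt b c = true) : keyLt a c = true := by
  obtain ⟨a1, a2, a3, a4, a5⟩ := a
  obtain ⟨b1, b2, b3, b4, b5⟩ := b
  obtain ⟨c1, c2, c3, c4, c5⟩ := c
  simp only [keyLt, decide_eq_true_eq] at h1 h2 ⊢
  omega

theorem pick_mem (f : List String → Int × Int × Int × Int × Int) (l : List (List String)) :
    ∀ b, pick f b l ∈ b :: l := by
  induction l with
  | nil => intro b; simp [pick]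
  | cons e t ih =>
    intro b
    simp only [pick]
    by_cases h : keyLt (f b) (f e) = true
    · rw [if_pos h]
      have := ih e
      simp only [List.mem_cons] at this ⊢
      tauto
    · rw [if_neg h]
      have := ih b
      simp only [List.mem_cons] at this ⊢
      tauto

-- pick attains the maximum key over b :: l
theorem pick_isMax (f : List String → Int × Int × Int × Int × Int) (l : List (List String)) :
    ∀ b y, y ∈ b :: l → keyLt (f (pick f b l)) (f y) = false := by
  induction l with
  | nil =>
    intro b y hy
    simp only [List.mem_cons, List.not_mem_nil, or_false] at hy
    rw [hy, pick]
    exact keyLt_irrefl _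
  | cons e t ih =>
    intro b y hy
    simp only [List.mem_cons] at hy
    simp only [pick]
    by_cases hbe : keyLt (f b) (f e) = true
    · rw [if_pos hbe]
      rcases hy with hy | hy | hy
      · rw [hy]
        cases hpe : keyLt (f (pick f e t)) (f b) with
        | false => rfl
        | true =>
          have h3 := keyLt_trans hpe hbe
          rw [ih e e (by simp)] at h3
          simp at h3
      · rw [hy]; exact ih e e (by simp)
      · exact ih e y (by simp [hy])
    · rw [if_neg hbe]
      rw [Bool.not_eq_true] at hbe
      rcases hy with hy | hy | hy
      · rw [hy]; exact ih b b (by simp)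
      · rw [hy]
        cases hpe : keyLt (f (pick f b t)) (f e) with
        | false => rfl
        | true =>
          have hb := ih b b (by simp)
          cases hbp : keyLt (f b) (f (pick f b t)) with
          | true =>
            have h3 := keyLt_trans hbp hpe
            rw [hbe] at h3
            simp at h3
          | false =>
            have heq := keyLt_total hb hbp
            rw [heq, hbe] at hpe
            simp at hpe
      · exact ih b y (by simp [hy])

-- if pick's key equals the seed's key, no switch ever happened: pick = seed
theorem pick_stay (f : List String → Int × Int × Int × Int × Int) (l : List (List String)) :
    ∀ b, f b = f (pick f b l) → pick f b l = b := by
  induction l with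
  | nil => intro b _; rfl
  | cons e t ih =>
    intro b hb
    simp only [pick] at hb ⊢
    by_cases h : keyLt (f b) (f e) = true
    · rw [if_pos h] at hb ⊢
      have hmax := pick_isMax f t e e (by simp)
      rw [← hb] at hmax
      rw [hmax] at h
      exact absurd h Bool.false_ne_true
    · rw [if_neg h] at hb ⊢
      exact ih b hb

-- pick is the FIRST element of b :: l attaining the maximal key
theorem pick_find (f : List String → Int × Int × Int × Int × Int) (l : List (List String)) :
    ∀ b, (b :: l).find? (fun y => decide (f y = f (pick f b l))) = some (pick f b l) := by
  induction l with
  | nil => intro b; simp [pick, List.find?]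
  | cons e t ih =>
    intro b
    simp only [pick]
    by_cases h : keyLt (f b) (f e) = true
    · simp only [h, if_true]
      have hne : f b ≠ f (pick f e t) := by
        intro hcontra
        have hmax := pick_isMax f t e e (by simp)
        rw [← hcontra] at hmax
        rw [hmax] at h
        exact Bool.false_ne_true h
      rw [List.find?_cons_of_neg (by simpa using hne)]
      exact ih e
    · rw [Bool.not_eq_true] at h
      simp only [h, Bool.false_eq_true, if_false]
      by_cases hbk : f b = f (pick f b t)
      · rw [List.find?_cons_of_pos (by simpa using hbk)]
        rw [pick_stay f t b hbk]
      · have hib := ih b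
        rw [List.find?_cons_of_neg (by simpa using hbk)] at hib
        have hek : f e ≠ f (pick f b t) := by
          intro hcontra
          have hmaxb := pick_isMax f t b b (by simp)
          rw [hcontra] at h
          exact hbk (keyLt_total hmaxb h).symm
        rw [List.find?_cons_of_neg (by simpa using hbk),
            List.find?_cons_of_neg (by simpa using hek)]
        exact hib

-- A's fold from a seeded state computes pick
theorem foldA_eq_pick (f : List String → Int × Int × Int × Int × Int)
    (l : List (List String)) : ∀ b,
    (l.foldl
      (fun (st : Option (List String) × Option (Int × Int × Int × Int × Int)) e =>
        let key := f e
        match st with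
        | (none, _) => (some e, some key)
        | (some b, some bk) => if keyLt bk key then (some e, some key) else (some b, some bk)
        | (some _, none) => (some e, some key))
      (some b, some (f b))) = (some (pick f b l), some (f (pick f b l))) := by
  induction l with
  | nil => intro b; simp [pick]
  | cons e t ih =>
    intro b
    simp only [List.foldl_cons, pick]
    by_cases h : keyLt (f b) (f e) = true
    · simp only [h, if_pos]
      exact ih e
    · rw [Bool.not_eq_true] at h
      simp only [h]
      simpa using ih b

-- one stage of B's cascade, applied to a filtered candidate list, sharpens the filter
theorem refine1_stage (g : List String → Int) (q : List String → Bool)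
    (L : List (List String)) (p : List String)
    (hp : p ∈ L) (hq : q p = true)
    (hmax : ∀ y ∈ L, q y = true → g y ≤ g p) :
    refine1 g (L.filter q) = L.filter (fun e => q e && (g e == g p)) := by
  have hpf : p ∈ L.filter q := List.mem_filter.mpr ⟨hp, hq⟩
  have hgp : g p ∈ (L.filter q).map g := List.mem_map.mpr ⟨p, hpf, rfl⟩
  unfold refine1
  cases hm : PySem.List.max? ((L.filter q).map g) (fun x => x) with
  | none =>
    rw [PySem.List.max?_eq_none_iff] at hm
    rw [hm] at hgp
    exact absurd hgp (List.not_mem_nil)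
  | some m =>
    have hmem := PySem.List.max?_mem hm
    have hle := PySem.List.max?_isMax hm (g p) hgp
    obtain ⟨x, hx, hxm⟩ := List.mem_map.mp hmem
    obtain ⟨hxL, hxq⟩ := List.mem_filter.mp hx
    have hge : m ≤ g p := hxm ▸ hmax x hxL hxq
    have hmp : m = g p := le_antisymm hge hle
    rw [hmp]
    show List.filter (fun e => g e == g p) (List.filter q L) = List.filter (fun e => q e && (g e == g p)) L
    rw [List.filter_filter]
    apply List.filter_congr
    intro e _
    exact Bool.and_comm _ _

-- the per-stage max hypothesis, extracted from pick_isMax componentwise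
theorem key_le_of_isMax {K Y : Int × Int × Int × Int × Int} (h : keyLt K Y = false) :
    (Y.1 ≤ K.1) ∧ (Y.1 = K.1 → Y.2.1 ≤ K.2.1) ∧ (Y.1 = K.1 → Y.2.1 = K.2.1 → Y.2.2.1 ≤ K.2.2.1) ∧
    (Y.1 = K.1 → Y.2.1 = K.2.1 → Y.2.2.1 = K.2.2.1 → Y.2.2.2.1 ≤ K.2.2.2.1) ∧
    (Y.1 = K.1 → Y.2.1 = K.2.1 → Y.2.2.1 = K.2.2.1 → Y.2.2.2.1 = K.2.2.2.1 → Y.2.2.2.2 ≤ K.2.2.2.2) := by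
  obtain ⟨a1, a2, a3, a4, a5⟩ := K
  obtain ⟨b1, b2, b3, b4, b5⟩ := Y
  simp only [keyLt, decide_eq_false_iff_not, not_or, not_and_or, not_lt] at h
  refine ⟨?_, ?_, ?_, ?_, ?_⟩ <;> simp only <;> omega

-- '0 if x in ("", ".") else 1' equals '1 if x not in ("", ".") else 0'
theorem scoreIfAux (c : String) :
    (if c = "" ∨ c = "." then (0:Int) else 1) = (if c ≠ "" ∧ c ≠ "." then 1 else 0) := by
  by_cases h : c = "" ∨ c = "."
  · rw [if_pos h, if_neg (by tauto)]
  · rw [if_neg h, if_pos (by tauto)]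

-- B's five score functions are the five components of A's key tuple
theorem score_eq_key (csq_fields : List String) (e : List String) :
    scoreMPC csq_fields e = (keyOf csq_fields e).1 ∧
    scoreMS csq_fields e = (keyOf csq_fields e).2.1 ∧
    scoreM csq_fields e = (keyOf csq_fields e).2.2.1 ∧
    scoreC csq_fields e = (keyOf csq_fields e).2.2.2.1 ∧
    scoreI csq_fields e = (keyOf csq_fields e).2.2.2.2 := by
  unfold scoreMPC scoreMS scoreM scoreC scoreI keyOf
  exact ⟨scoreIfAux _, scoreIfAux _, scoreIfAux _, rfl, rfl⟩

-- the whole equivalence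
theorem choose_best_csq_eq (csq_entries : List (List String)) (csq_fields : List String) :
    choose_best_csq csq_entries csq_fields = choose_best_csq_alt csq_entries csq_fields := by
  unfold choose_best_csq choose_best_csq_alt
  by_cases hemp : csq_entries = [] ∨ csq_fields = []
  · rw [if_pos hemp, if_pos hemp]
  · rw [if_neg hemp, if_neg hemp]
    cases csq_entries with
    | nil => exact absurd (Or.inl rfl) hemp
    | cons b l =>
      set f := keyOf csq_fields with hf
      set p := pick f b l with hp
      -- A side
      have hA : (List.foldl
          (fun (st : Option (List String) × Option (Int × Int × Int × Int × Int)) e =>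
            let key := f e
            match st with
            | (none, _) => (some e, some key)
            | (some b, some bk) => if keyLt bk key then (some e, some key) else (some b, some bk)
            | (some _, none) => (some e, some key))
          (none, none) (b :: l)).1 = some p := by
        rw [List.foldl_cons]
        have := foldA_eq_pick f l b
        simp only at this ⊢
        rw [this]
      rw [hA]
      -- B side: run the five cascade stages with refine1_stage
      have hpm : p ∈ b :: l := pick_mem f l b
      have hmax := pick_isMax f l b
      have hcomp := fun y (hy : y ∈ b :: l) => key_le_of_isMax (hmax y hy)
      have hs := fun e => score_eq_key csq_fields e
      simp only [List.foldl_cons, List.foldl_nil]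
      have h1 : refine1 (scoreMPC csq_fields) (b :: l)
          = (b :: l).filter (fun e => true && (scoreMPC csq_fields e == scoreMPC csq_fields p)) := by
        rw [← List.filter_true (b :: l)]
        rw [refine1_stage _ _ _ p (by simpa using hpm) rfl]
        · rw [List.filter_true]
        · intro y hy _
          rw [(hs y).1, (hs p).1]
          exact (hcomp y hy).1
      rw [h1]
      have h2 : refine1 (scoreMS csq_fields)
            ((b :: l).filter (fun e => true && (scoreMPC csq_fields e == scoreMPC csq_fields p)))
          = (b :: l).filter (fun e => (true && (scoreMPC csq_fields e == scoreMPC csq_fields p))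
              && (scoreMS csq_fields e == scoreMS csq_fields p)) := by
        apply refine1_stage _ _ _ p hpm (by simp)
        intro y hy hqy
        simp only [Bool.true_and, beq_iff_eq] at hqy
        rw [(hs y).2.1, (hs p).2.1]
        refine (hcomp y hy).2.1 ?_
        have := hqy
        rw [(hs y).1, (hs p).1] at this
        exact this
      rw [h2]
      have h3 : refine1 (scoreM csq_fields)
            ((b :: l).filter (fun e => (true && (scoreMPC csq_fields e == scoreMPC csq_fields p))
              && (scoreMS csq_fields e == scoreMS csq_fields p)))
          = (b :: l).filter (fun e => ((true && (scoreMPC csq_fields e == scoreMPC csq_fields p))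
              && (scoreMS csq_fields e == scoreMS csq_fields p))
              && (scoreM csq_fields e == scoreM csq_fields p)) := by
        apply refine1_stage _ _ _ p hpm (by simp)
        intro y hy hqy
        simp only [Bool.true_and, Bool.and_eq_true, beq_iff_eq] at hqy
        obtain ⟨ha, hb2⟩ := hqy
        rw [(hs y).1, (hs p).1] at ha
        rw [(hs y).2.1, (hs p).2.1] at hb2
        rw [(hs y).2.2.1, (hs p).2.2.1]
        exact (hcomp y hy).2.2.1 ha hb2
      rw [h3]
      have h4 : refine1 (scoreC csq_fields)
            ((b :: l).filter (fun e => ((true && (scoreMPC csq_fields e == scoreMPC csq_fields p))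
              && (scoreMS csq_fields e == scoreMS csq_fields p))
              && (scoreM csq_fields e == scoreM csq_fields p)))
          = (b :: l).filter (fun e => (((true && (scoreMPC csq_fields e == scoreMPC csq_fields p))
              && (scoreMS csq_fields e == scoreMS csq_fields p))
              && (scoreM csq_fields e == scoreM csq_fields p))
              && (scoreC csq_fields e == scoreC csq_fields p)) := by
        apply refine1_stage _ _ _ p hpm (by simp)
        intro y hy hqy
        simp only [Bool.true_and, Bool.and_eq_true, beq_iff_eq] at hqy
        obtain ⟨⟨ha, hb2⟩, hc⟩ := hqy
        rw [(hs y).1, (hs p).1] at ha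
        rw [(hs y).2.1, (hs p).2.1] at hb2
        rw [(hs y).2.2.1, (hs p).2.2.1] at hc
        rw [(hs y).2.2.2.1, (hs p).2.2.2.1]
        exact (hcomp y hy).2.2.2.1 ha hb2 hc
      rw [h4]
      have h5 : refine1 (scoreI csq_fields)
            ((b :: l).filter (fun e => (((true && (scoreMPC csq_fields e == scoreMPC csq_fields p))
              && (scoreMS csq_fields e == scoreMS csq_fields p))
              && (scoreM csq_fields e == scoreM csq_fields p))
              && (scoreC csq_fields e == scoreC csq_fields p)))
          = (b :: l).filter (fun e => ((((true && (scoreMPC csq_fields e == scoreMPC csq_fields p))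
              && (scoreMS csq_fields e == scoreMS csq_fields p))
              && (scoreM csq_fields e == scoreM csq_fields p))
              && (scoreC csq_fields e == scoreC csq_fields p))
              && (scoreI csq_fields e == scoreI csq_fields p)) := by
        apply refine1_stage _ _ _ p hpm (by simp)
        intro y hy hqy
        simp only [Bool.true_and, Bool.and_eq_true, beq_iff_eq] at hqy
        obtain ⟨⟨⟨ha, hb2⟩, hc⟩, hd⟩ := hqy
        rw [(hs y).1, (hs p).1] at ha
        rw [(hs y).2.1, (hs p).2.1] at hb2
        rw [(hs y).2.2.1, (hs p).2.2.1] at hc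
        rw [(hs y).2.2.2.1, (hs p).2.2.2.1] at hd
        rw [(hs y).2.2.2.2, (hs p).2.2.2.2]
        exact (hcomp y hy).2.2.2.2 ha hb2 hc hd
      rw [h5]
      -- the final filter's predicate is "key e = key p"; its head is find?, which is pick
      have hpred : (fun e => ((((true && (scoreMPC csq_fields e == scoreMPC csq_fields p))
              && (scoreMS csq_fields e == scoreMS csq_fields p))
              && (scoreM csq_fields e == scoreM csq_fields p))
              && (scoreC csq_fields e == scoreC csq_fields p))
              && (scoreI csq_fields e == scoreI csq_fields p))
          = (fun e => decide (f e = f p)) := by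
        funext e
        rw [Bool.eq_iff_iff]
        simp only [Bool.true_and, Bool.and_eq_true, beq_iff_eq, decide_eq_true_eq]
        rw [(hs e).1, (hs p).1, (hs e).2.1, (hs p).2.1, (hs e).2.2.1, (hs p).2.2.1,
          (hs e).2.2.2.1, (hs p).2.2.2.1, (hs e).2.2.2.2, (hs p).2.2.2.2]
        constructor
        · rintro ⟨⟨⟨⟨h1, h2⟩, h3⟩, h4⟩, h5⟩
          exact Prod.ext h1 (Prod.ext h2 (Prod.ext h3 (Prod.ext h4 h5)))
        · intro h
          exact ⟨⟨⟨⟨congrArg (fun z => z.1) h, congrArg (fun z => z.2.1) h⟩,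
            congrArg (fun z => z.2.2.1) h⟩, congrArg (fun z => z.2.2.2.1) h⟩,
            congrArg (fun z => z.2.2.2.2) h⟩
      rw [hpred]
      have hzero : PySem.List.pyGet? ((b :: l).filter (fun e => decide (f e = f p))) (0 : Int)
          = ((b :: l).filter (fun e => decide (f e = f p))).head? := by
        rw [show (0:Int) = ((0:Nat):Int) from rfl, PySem.List.pyGet?_natCast,
          List.head?_eq_getElem?]
      rw [hzero, List.head?_filter, pick_find f l b]

-- ===== VERDICT (by name: the statement is the Claim_ definition above) =====
theorem choose_best_csq_spec : Claim_equal_choose_best_csq := by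
  intro csq_entries csq_fields _
  unfold Spec_choose_best_csq
  exact choose_best_csq_eq csq_entries csq_fields
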